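-- pv_equiv track=rewrite | github.com/mathu3004/Pearl_Path | Design_Travel_Itinerary/travel-itinerary-generator/backend/app2.py | allocate_days_to_destinations
-- ===== SOURCE A (Python) =====
-- def allocate_days_to_destinations(destinations, num_days):
--     allocation_rules = {1: (1, 1), 2: (1, 2), 3: (1, 3), 4: (1, 4), 5: (1, 4)}
--     min_dest, max_dest = allocation_rules.get(num_days, (1, 1))
--     num_destinations = min(max_dest, len(destinations))
--     selected_destinations = destinations[:num_destinations]
--
--     days_per_destination = {dest: 1 for dest in selected_destinations}
--     remaining_days = num_days - len(selected_destinations)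
--
--     index = 0
--     while remaining_days > 0 and selected_destinations:
--         dest = selected_destinations[index]
--         days_per_destination[dest] += 1
--         remaining_days -= 1
--         index = (index + 1) % len(selected_destinations)
--
--     return days_per_destination
-- ===== SOURCE B (Python) =====
-- def allocate_days_to_destinations(destinations, num_days):
--     # Closed form: divmod instead of looping once per remaining day.
--     allocation_rules = {1: (1, 1), 2: (1, 2), 3: (1, 3), 4: (1, 4), 5: (1, 4)}
--     max_dest = allocation_rules.get(num_days, (1, 1))[1]
--     selected = destinations[:min(max_dest, len(destinations))]
--     days = {d: 1 for d in selected}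
--     n = len(selected)
--     remaining = num_days - n
--     if remaining > 0 and n > 0:
--         q, r = divmod(remaining, n)
--         for i, d in enumerate(selected):
--             days[d] += q + (1 if i < r else 0)
--     return days
-- ===== Notes on version B (the rewrite author's own statement) =====
-- stated objective: faster
-- what changed: Replaces the round-robin while-loop that hands out one day per iteration (num_days iterations) with a closed-form divmod: every selected destination gets 1 + remaining//n days and the first remaining%n destinations one extra day, assigned in a single pass.
import Mathlib
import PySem

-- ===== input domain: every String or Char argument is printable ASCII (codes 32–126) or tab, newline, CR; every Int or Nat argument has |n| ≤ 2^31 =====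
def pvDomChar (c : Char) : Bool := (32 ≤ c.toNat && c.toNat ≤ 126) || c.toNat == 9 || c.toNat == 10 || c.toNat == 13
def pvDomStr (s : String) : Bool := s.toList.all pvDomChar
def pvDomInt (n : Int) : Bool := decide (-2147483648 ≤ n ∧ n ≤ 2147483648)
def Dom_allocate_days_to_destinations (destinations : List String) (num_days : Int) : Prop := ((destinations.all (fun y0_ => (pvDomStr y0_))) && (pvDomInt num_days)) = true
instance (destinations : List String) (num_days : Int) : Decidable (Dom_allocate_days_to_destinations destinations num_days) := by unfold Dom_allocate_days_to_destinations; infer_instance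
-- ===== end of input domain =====

-- B replaces A's one-day-at-a-time round-robin while-loop by a closed-form divmod split:
-- each selected destination gets 1 + q days, plus one extra day for the first r of them,
-- where (q, r) = divmod(remaining, n).  A is total; equivalence is proved on all inputs.

-- ===== PORT A =====
-- A's while loop; fuel = remaining_days (it decreases by exactly 1 per iteration, and the
-- loop does not run when remaining_days ≤ 0, i.e. toNat = 0).  `days_per_destination[dest] += 1`
-- is `modify dest 0 (· + 1)` (dest is always a key, so the default 0 is never used); the
-- `and selected_destinations` conjunct is re-tested each iteration, as in the Python.
def allocADloop (sel : List String) : PySem.Dict String Int → Nat → Nat → PySem.Dict String Int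
  | d, 0, _ => d
  | d, k + 1, index =>
      if sel.isEmpty then d
      else
        allocADloop sel (d.modify (PySem.List.pyGetD sel (index : Int) "") 0 (· + 1)) k
          ((index + 1) % sel.length)

def allocate_days_to_destinations (destinations : List String) (num_days : Int) : List (String × Int) :=
  let allocation_rules : PySem.Dict Int (Int × Int) :=
    PySem.Dict.ofList [(1, (1, 1)), (2, (1, 2)), (3, (1, 3)), (4, (1, 4)), (5, (1, 4))]
  let max_dest := (allocation_rules.getD num_days (1, 1)).2
  let num_destinations := min max_dest (destinations.length : Int)
  let selected_destinations := PySem.List.slice destinations none (some num_destinations)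
  let days_per_destination :=
    selected_destinations.foldl (fun d dest => d.insert dest 1) PySem.Dict.empty
  let remaining_days := num_days - (selected_destinations.length : Int)
  (allocADloop selected_destinations days_per_destination remaining_days.toNat 0).items

-- ===== PORT B =====
def allocate_days_to_destinations_alt (destinations : List String) (num_days : Int) : List (String × Int) :=
  let allocation_rules : PySem.Dict Int (Int × Int) :=
    PySem.Dict.ofList [(1, (1, 1)), (2, (1, 2)), (3, (1, 3)), (4, (1, 4)), (5, (1, 4))]
  let max_dest := (allocation_rules.getD num_days (1, 1)).2
  let selected := PySem.List.slice destinations none (some (min max_dest (destinations.length : Int)))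
  let days := selected.foldl (fun d dest => d.insert dest 1) PySem.Dict.empty
  let n := (selected.length : Int)
  let remaining := num_days - n
  if remaining > 0 ∧ n > 0 then
    let q := PySem.Int.floordiv remaining n
    let r := PySem.Int.mod remaining n
    -- `days[d] += …` : d is always a key, so modify's default 0 is never used
    ((PySem.List.enumerate selected).foldl
        (fun d p => d.modify p.2 0 (· + (q + (if p.1 < r then 1 else 0)))) days).items
  else days.items

-- ===== PRECONDITION & SPEC =====
def Spec_allocate_days_to_destinations (destinations : List String) (num_days : Int) (out : List (String × Int)) : Prop := out = allocate_days_to_destinations_alt destinations num_days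
instance (destinations : List String) (num_days : Int) (out : List (String × Int)) : Decidable (Spec_allocate_days_to_destinations destinations num_days out) := by unfold Spec_allocate_days_to_destinations; infer_instance

-- ===== CLAIM (what is proved, stated in full; the proofs are below) =====
def Claim_equal_allocate_days_to_destinations : Prop := ∀ (destinations : List String) (num_days : Int), Dom_allocate_days_to_destinations destinations num_days → Spec_allocate_days_to_destinations destinations num_days (allocate_days_to_destinations destinations num_days)

-- ===== LEMMAS AND PROOFS =====

theorem allocADloop_nil (k i : Nat) (d : PySem.Dict String Int) :
    allocADloop [] d k i = d := by
  cases k <;> simp [allocADloop]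

-- A's loop, viewed as a left fold over the list of destinations it visits
theorem allocADloop_eq_foldl (sel : List String) (hne : sel ≠ []) :
    ∀ (k i : Nat) (d : PySem.Dict String Int), i < sel.length →
      allocADloop sel d k i =
        ((List.range k).map (fun t => sel.getD ((i + t) % sel.length) "")).foldl
          (fun d x => d.modify x 0 (· + 1)) d := by
  intro k
  induction k with
  | zero => intro i d hi; simp [allocADloop]
  | succ k ih =>
    intro i d hi
    have hn : 0 < sel.length := List.length_pos_of_ne_nil hne
    rw [allocADloop, if_neg (by simp [hne])]
    rw [ih ((i + 1) % sel.length) _ (Nat.mod_lt _ hn)]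
    rw [List.range_succ_eq_map, List.map_cons, List.foldl_cons, List.map_map]
    have h1 : (i + 0) % sel.length = i := by rw [Nat.add_zero]; exact Nat.mod_eq_of_lt hi
    have h2 : ((fun t => sel.getD ((i + t) % sel.length) "") ∘ (· + 1)) =
        (fun t => sel.getD (((i + 1) % sel.length + t) % sel.length) "") := by
      funext t
      simp only [Function.comp]
      congr 1
      rw [Nat.mod_add_mod]; ring_nf
    rw [h1, h2]
    congr 1
    simp [PySem.List.pyGetD_natCast]

theorem map_range_getD (xs : List String) (r : Nat) (h : r ≤ xs.length) :
    (List.range r).map (fun t => xs.getD t "") = xs.take r := by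
  apply List.ext_getElem
  · simp [h]
  · intro i h1 h2
    simp at h1 h2 ⊢
    rw [List.getElem?_eq_getElem (by omega), Option.getD_some]

theorem count_full (sel : List String) (key : String) :
    ∀ q : Nat, (((List.range (sel.length * q)).map (fun t => sel.getD (t % sel.length) "")).count key)
      = q * sel.count key := by
  intro q
  induction q with
  | zero => simp
  | succ q ih =>
    rw [Nat.mul_succ, List.range_add, List.map_append, List.count_append, ih, List.map_map]
    have h3 : List.map ((fun t => sel.getD (t % sel.length) "") ∘ (fun x => sel.length * q + x)) (List.range sel.length)
        = List.map (fun t => sel.getD t "") (List.range sel.length) := by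
      apply List.map_congr_left
      intro t ht
      simp only [Function.comp]
      have : (sel.length * q + t) % sel.length = t := by
        rw [Nat.add_comm, Nat.add_mul_mod_self_left]
        exact Nat.mod_eq_of_lt (List.mem_range.mp ht)
      rw [this]
    rw [h3, map_range_getD sel sel.length le_rfl, List.take_length]
    ring

-- the destinations visited over length·q + r steps: q full copies of sel plus sel.take r
theorem count_visited_gen (sel : List String) (q r : Nat) (hr : r < sel.length) (key : String) :
    (((List.range (sel.length * q + r)).map (fun t => sel.getD (t % sel.length) "")).count key) =
      q * sel.count key + (sel.take r).count key := by
  rw [List.range_add, List.map_append, List.count_append, count_full sel key, List.map_map]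
  congr 1
  have h3 : List.map ((fun t => sel.getD (t % sel.length) "") ∘ (fun x => sel.length * q + x)) (List.range r)
      = List.map (fun t => sel.getD t "") (List.range r) := by
    apply List.map_congr_left
    intro t ht
    simp only [Function.comp]
    have : (sel.length * q + t) % sel.length = t := by
      rw [Nat.add_comm, Nat.add_mul_mod_self_left]
      exact Nat.mod_eq_of_lt (lt_trans (List.mem_range.mp ht) hr)
    rw [this]
  rw [h3, map_range_getD sel _ (le_of_lt hr)]

theorem count_visited (sel : List String) (hne : sel ≠ []) (k : Nat) (key : String) :
    (((List.range k).map (fun t => sel.getD (t % sel.length) "")).count key) =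
      (k / sel.length) * sel.count key + (sel.take (k % sel.length)).count key := by
  have hn : 0 < sel.length := List.length_pos_of_ne_nil hne
  have hk : k = sel.length * (k / sel.length) + k % sel.length := (Nat.div_add_mod k sel.length).symm
  conv_lhs => rw [hk]
  exact count_visited_gen sel _ _ (Nat.mod_lt _ hn) key

-- the value B's single pass leaves at each key
theorem B_fold_getD (q r : Int) (key : String) :
    ∀ (sel : List String) (s : Int) (d : PySem.Dict String Int),
      ((PySem.List.enumerate sel s).foldl
          (fun d p => d.modify p.2 0 (· + (q + (if p.1 < r then 1 else 0)))) d).getD key 0 =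
        d.getD key 0 + q * (sel.count key : Int) +
          ((sel.take (r - s).toNat).count key : Int) := by
  intro sel
  induction sel with
  | nil => intro s d; simp [PySem.List.enumerate]
  | cons x t ih =>
    intro s d
    rw [PySem.List.enumerate_cons, List.foldl_cons, ih (s+1)]
    rw [PySem.Dict.getD_modify]
    by_cases hx : key = x
    · subst hx
      simp only [List.count_cons_self]
      by_cases hs : s < r
      · have h1 : (r - s).toNat = ((r - (s+1)).toNat) + 1 := by omega
        rw [h1, List.take_succ_cons, List.count_cons_self, if_pos hs]
        push_cast
        ring
      · have h1 : (r - s).toNat = 0 := by omega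
        have h2 : (r - (s+1)).toNat = 0 := by omega
        rw [h1, h2, if_neg hs]
        simp
        ring
    · rw [if_neg hx]
      by_cases hs : s < r
      · have h1 : (r - s).toNat = ((r - (s+1)).toNat) + 1 := by omega
        rw [h1, List.take_succ_cons]
        simp [Ne.symm hx]
      · have h1 : (r - s).toNat = 0 := by omega
        have h2 : (r - (s+1)).toNat = 0 := by omega
        rw [h1, h2]
        simp [Ne.symm hx]

theorem set_update_eq_self {α : Type} [BEq α] [LawfulBEq α] (s : PySem.Set α) (xs : List α)
    (h : ∀ x ∈ xs, x ∈ s) : PySem.Set.update s xs = s := by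
  rw [PySem.Set.update_eq_append_filter]
  have : List.filter (fun y => !s.contains y) (PySem.Set.ofList xs) = [] := by
    rw [List.filter_eq_nil_iff]
    intro y hy
    have hm : y ∈ s := h y ((PySem.Set.mem_ofList xs y).mp hy)
    simpa using hm
  rw [this, List.append_nil]

-- the initial dict {dest: 1 for dest in sel}
theorem days_keys (sel : List String) :
    (sel.foldl (fun d dest => d.insert dest 1) (PySem.Dict.empty : PySem.Dict String Int)).keys
      = PySem.Set.ofList sel := by
  rw [PySem.Dict.keys_foldl_insert sel (fun _ _ => (1 : Int))]
  simp [PySem.Set.update_nil_left]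

theorem mem_visited (sel : List String) (hne : sel ≠ []) (k : Nat) :
    ∀ x ∈ (List.range k).map (fun t => sel.getD (t % sel.length) ""), x ∈ sel := by
  intro x hx
  obtain ⟨t, _, rfl⟩ := List.mem_map.mp hx
  have hn : 0 < sel.length := List.length_pos_of_ne_nil hne
  rw [List.getD_eq_getElem _ _ (Nat.mod_lt _ hn)]
  exact List.getElem_mem _

-- ===== VERDICT (by name: the statement is the Claim_ definition above) =====
theorem allocate_days_to_destinations_spec : Claim_equal_allocate_days_to_destinations := by
  intro destinations num_days _
  unfold Spec_allocate_days_to_destinations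
  unfold allocate_days_to_destinations allocate_days_to_destinations_alt
  simp only []
  set sel := PySem.List.slice destinations none
      (some (min ((PySem.Dict.ofList [((1:Int), ((1:Int), (1:Int))), (2, (1, 2)), (3, (1, 3)), (4, (1, 4)), (5, (1, 4))]).getD num_days (1, 1)).2 (destinations.length : Int))) with hsel
  set days := sel.foldl (fun d dest => d.insert dest 1) (PySem.Dict.empty : PySem.Dict String Int) with hdays
  set remaining := num_days - (sel.length : Int) with hrem
  by_cases hcond : remaining > 0 ∧ (sel.length : Int) > 0
  · rw [if_pos hcond]
    obtain ⟨hr0, hn0⟩ := hcond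
    have hn : 0 < sel.length := by exact_mod_cast hn0
    have hne : sel ≠ [] := List.ne_nil_of_length_pos hn
    set k := remaining.toNat with hk
    have hkr : (k : Int) = remaining := Int.toNat_of_nonneg (le_of_lt hr0)
    -- A's side as a fold
    rw [allocADloop_eq_foldl sel hne k 0 days hn]
    -- items via keys and getD
    have hdk : days.keys = PySem.Set.ofList sel := days_keys sel
    have hAkeys : (((List.range k).map (fun t => sel.getD ((0 + t) % sel.length) "")).foldl
        (fun d x => d.modify x 0 (· + 1)) days).keys = PySem.Set.ofList sel := by
      rw [PySem.Dict.keys_foldl_modify _ 0 (fun _ _ v => v + 1), hdk]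
      apply set_update_eq_self
      intro x hx
      simp only [Nat.zero_add] at hx
      exact (PySem.Set.mem_ofList sel x).mpr (mem_visited sel hne k x hx)
    have hBkeys : (((PySem.List.enumerate sel).foldl
        (fun d p => d.modify p.2 0 (· + (PySem.Int.floordiv remaining (sel.length : Int) + (if p.1 < PySem.Int.mod remaining (sel.length : Int) then 1 else 0)))) days)).keys = PySem.Set.ofList sel := by
      rw [PySem.Dict.keys_foldl_modify_key, hdk]
      rw [PySem.List.map_snd_enumerate]
      exact set_update_eq_self _ _ (fun x hx => (PySem.Set.mem_ofList sel x).mpr hx)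
    have hgetD : ∀ key : String,
        (((List.range k).map (fun t => sel.getD ((0 + t) % sel.length) "")).foldl
          (fun d x => d.modify x 0 (· + 1)) days).getD key 0 =
        (((PySem.List.enumerate sel).foldl
          (fun d p => d.modify p.2 0 (· + (PySem.Int.floordiv remaining (sel.length : Int) + (if p.1 < PySem.Int.mod remaining (sel.length : Int) then 1 else 0)))) days)).getD key 0 := by
      intro key
      rw [PySem.Dict.getD_foldl_modify_add_one, B_fold_getD]
      simp only [Nat.zero_add]
      rw [count_visited sel hne k key]
      have hfd : PySem.Int.floordiv remaining (sel.length : Int) = ((k / sel.length : Nat) : Int) := by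
        rw [← hkr]; exact_mod_cast PySem.Int.floordiv_natCast k sel.length
      have hmd : PySem.Int.mod remaining (sel.length : Int) = ((k % sel.length : Nat) : Int) := by
        rw [← hkr]; exact_mod_cast PySem.Int.mod_natCast k sel.length
      rw [hfd, hmd]
      have : ((((k % sel.length : Nat) : Int)) - 0).toNat = k % sel.length := by omega
      rw [this]
      push_cast
      ring
    rw [PySem.Dict.items_eq_map_keys _ (hAkeys ▸ PySem.Set.nodup_ofList sel) 0,
        PySem.Dict.items_eq_map_keys _ (hBkeys ▸ PySem.Set.nodup_ofList sel) 0,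
        hAkeys, hBkeys]
    apply List.map_congr_left
    intro key _
    rw [hgetD key]
  · rw [if_neg hcond]
    rcases Decidable.em (remaining > 0) with hr | hr
    · -- then sel.length = 0, i.e. sel = []
      have hn : sel = [] := by
        have : ¬ ((sel.length : Int) > 0) := fun h => hcond ⟨hr, h⟩
        have : sel.length = 0 := by omega
        exact List.eq_nil_of_length_eq_zero this
      rw [hn, allocADloop_nil]
    · have : remaining.toNat = 0 := by omega
      rw [this]
      rfl
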